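-- pv_equiv track=rewrite | github.com/rizveeredwan/Incremental-Sequential-Pattern-Mining-with-SP-Tree. | Implementation/INCSP/Colab-Version/INCSP.py | GenerateSubPatternsAndCheck
-- ===== SOURCE A (Python) =====
-- def GenerateSubPatternsAndCheck(base_pattern, hash_table):
--     for i in range(0,len(base_pattern)):
--         for j in range(0,len(base_pattern[i])):
--             sub_patt = []
--             for k in range(0,len(base_pattern)):
--                 temp = []
--                 for l in range(0,len(base_pattern[k])):
--                     if(k == i and j == l):
--                         continue
--                     else:
--                         temp.append(base_pattern[k][l])
--                 if(len(temp) > 0):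
--                     sub_patt.append(temp)
--             if(hash_table.get(str(sub_patt)) == None):
--                 return False
--     return True
-- ===== SOURCE B (Python) =====
-- def GenerateSubPatternsAndCheck(base_pattern, hash_table):
--     def without(i, j):
--         sub = []
--         for k, row in enumerate(base_pattern):
--             r = row[:j] + row[j + 1:] if k == i else row
--             if r:
--                 sub.append(r)
--         return sub
--     return all(str(without(i, j)) in hash_table
--                for i, row in enumerate(base_pattern)
--                for j in range(len(row)))
-- ===== Notes on version B (the rewrite author's own statement) =====
-- stated objective: simpler
-- what changed: The element-by-element skip-copy double loop that rebuilds every row is replaced by a single pass over the rows that slices out the one deleted element (row[:j]+row[j+1:]) and reuses all other rows unchanged, and the early-return loop nest is replaced by all(...) comprehensions with a key-membership test.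
import Mathlib
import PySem

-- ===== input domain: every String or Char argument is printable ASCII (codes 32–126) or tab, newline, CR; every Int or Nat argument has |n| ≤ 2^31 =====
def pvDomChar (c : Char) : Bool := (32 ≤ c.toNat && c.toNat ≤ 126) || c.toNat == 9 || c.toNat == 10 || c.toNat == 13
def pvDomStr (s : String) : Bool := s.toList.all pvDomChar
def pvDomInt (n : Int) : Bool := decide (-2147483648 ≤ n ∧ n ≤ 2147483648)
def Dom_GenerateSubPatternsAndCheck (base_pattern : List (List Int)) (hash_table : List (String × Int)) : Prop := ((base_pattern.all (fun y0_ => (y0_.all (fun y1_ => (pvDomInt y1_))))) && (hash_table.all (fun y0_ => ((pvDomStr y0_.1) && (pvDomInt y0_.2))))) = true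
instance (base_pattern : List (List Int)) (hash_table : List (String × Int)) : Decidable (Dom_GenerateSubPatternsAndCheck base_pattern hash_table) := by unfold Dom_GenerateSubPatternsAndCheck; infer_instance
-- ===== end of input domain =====

-- B replaces A's element-by-element skip-copy double loop by a single pass over the rows
-- that slices out the deleted element, and replaces the early-return loops by `all`
-- comprehensions with a key-membership test (objective: simpler).

-- shared port of Python's str() on a list of ints / list of lists of ints, e.g. "[[1, 2], [3]]"
def pvReprRow (row : List Int) : String :=
  "[" ++ String.intercalate ", " (row.map PySem.Int.toStr) ++ "]"
def pvReprPatt (p : List (List Int)) : String :=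
  "[" ++ String.intercalate ", " (p.map pvReprRow) ++ "]"

-- ===== PORT A =====
def pvA_temp (bp : List (List Int)) (i j k : Nat) : List Int :=
  (List.range (bp.getD k []).length).foldl
    (fun temp l => if k = i ∧ j = l then temp else temp ++ [(bp.getD k []).getD l 0]) []

def pvA_sub (bp : List (List Int)) (i j : Nat) : List (List Int) :=
  (List.range bp.length).foldl
    (fun sp k =>
      let temp := pvA_temp bp i j k
      if 0 < temp.length then sp ++ [temp] else sp) []

def pvA_loopJ (bp : List (List Int)) (ht : List (String × Int)) (i : Nat) : List Nat → Bool
  | [] => true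
  | j :: js =>
    if (PySem.Dict.mk ht).get? (pvReprPatt (pvA_sub bp i j)) = none then false
    else pvA_loopJ bp ht i js

def pvA_loopI (bp : List (List Int)) (ht : List (String × Int)) : List Nat → Bool
  | [] => true
  | i :: is =>
    if pvA_loopJ bp ht i (List.range (bp.getD i []).length) = false then false
    else pvA_loopI bp ht is

def GenerateSubPatternsAndCheck (base_pattern : List (List Int)) (hash_table : List (String × Int)) : Bool :=
  pvA_loopI base_pattern hash_table (List.range base_pattern.length)

-- ===== PORT B =====
def pvB_without (bp : List (List Int)) (i : Int) (j : Nat) : List (List Int) :=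
  (PySem.List.enumerate bp).foldl
    (fun sub kr =>
      let r := if kr.1 = i then kr.2.take j ++ kr.2.drop (j + 1) else kr.2
      if r ≠ [] then sub ++ [r] else sub) []

def GenerateSubPatternsAndCheck_alt (base_pattern : List (List Int)) (hash_table : List (String × Int)) : Bool :=
  (PySem.List.enumerate base_pattern).all (fun ir =>
    (List.range ir.2.length).all (fun j =>
      (PySem.Dict.mk hash_table).contains (pvReprPatt (pvB_without base_pattern ir.1 j))))

-- ===== PRECONDITION & SPEC =====
def Spec_GenerateSubPatternsAndCheck (base_pattern : List (List Int)) (hash_table : List (String × Int)) (out : Bool) : Prop := out = GenerateSubPatternsAndCheck_alt base_pattern hash_table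
instance (base_pattern : List (List Int)) (hash_table : List (String × Int)) (out : Bool) : Decidable (Spec_GenerateSubPatternsAndCheck base_pattern hash_table out) := by unfold Spec_GenerateSubPatternsAndCheck; infer_instance

-- ===== CLAIM (what is proved, stated in full; the proofs are below) =====
def Claim_equal_GenerateSubPatternsAndCheck : Prop := ∀ (base_pattern : List (List Int)) (hash_table : List (String × Int)), Dom_GenerateSubPatternsAndCheck base_pattern hash_table → Spec_GenerateSubPatternsAndCheck base_pattern hash_table (GenerateSubPatternsAndCheck base_pattern hash_table)

-- ===== LEMMAS AND PROOFS =====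

-- A's skip-copy fold = filter-then-map
lemma pv_foldl_skip (L : List Nat) (P : Nat → Prop) [DecidablePred P] (g : Nat → Int) (acc : List Int) :
    L.foldl (fun t l => if P l then t else t ++ [g l]) acc
      = acc ++ (L.filter (fun l => !decide (P l))).map g := by
  induction L generalizing acc with
  | nil => simp
  | cons x xs ih =>
    by_cases h : P x <;> simp [h, ih, List.append_assoc]

-- the conditional-append fold = filter of the mapped list
lemma pv_foldl_app {α β : Type} (L : List α) (R : α → List β) (P : List β → Prop)
    [DecidablePred P] (acc : List (List β)) :
    L.foldl (fun s x => let r := R x; if P r then s ++ [r] else s) acc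
      = acc ++ ((L.map R).filter (fun r => decide (P r))) := by
  induction L generalizing acc with
  | nil => simp
  | cons x xs ih =>
    by_cases h : P (R x) <;> simp [h, ih, List.append_assoc]

lemma pv_map_getD_range (xs : List Int) (d : Int) :
    (List.range xs.length).map (fun l => xs.getD l d) = xs := by
  apply List.ext_getElem
  · simp
  · intro n h1 h2
    simp [List.getD_eq_getElem?_getD, List.getElem?_eq_getElem h2]

lemma pv_map_getD_range_take (xs : List Int) (j : Nat) (d : Int) (h : j ≤ xs.length) :
    (List.range j).map (fun l => xs.getD l d) = xs.take j := by
  apply List.ext_getElem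
  · simp [h]
  · intro n h1 h2
    simp at h1
    simp [List.getD_eq_getElem?_getD, List.getElem?_eq_getElem (by omega : n < xs.length)]

lemma pv_map_getD_range_drop (xs : List Int) (j : Nat) (d : Int) :
    (List.range (xs.length - (j + 1))).map (fun k => xs.getD (j + 1 + k) d) = xs.drop (j + 1) := by
  apply List.ext_getElem
  · simp
  · intro n h1 h2
    simp at h1
    simp [List.getD_eq_getElem?_getD, List.getElem?_eq_getElem (by omega : j + 1 + n < xs.length)]

lemma pv_del_idx (xs : List Int) (j : Nat) (d : Int) :
    ((List.range xs.length).filter (fun l => !decide (j = l))).map (fun l => xs.getD l d)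
      = xs.take j ++ xs.drop (j + 1) := by
  by_cases hj : j < xs.length
  · have hsplit : xs.length = (j + 1) + (xs.length - (j + 1)) := by omega
    rw [hsplit, List.range_add, List.range_succ]
    rw [List.filter_append, List.filter_append]
    have h1 : (List.range j).filter (fun l => !decide (j = l)) = List.range j := by
      apply List.filter_eq_self.mpr
      intro a ha
      simp at ha ⊢
      omega
    have h2 : ([j].filter (fun l => !decide (j = l))) = [] := by simp
    have h3 : ((List.range (xs.length - (j + 1))).map (fun k => j + 1 + k)).filter
        (fun l => !decide (j = l)) = (List.range (xs.length - (j + 1))).map (fun k => j + 1 + k) := by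
      apply List.filter_eq_self.mpr
      intro a ha
      simp at ha ⊢
      obtain ⟨k, hk, rfl⟩ := ha
      omega
    rw [h1, h2, h3, List.map_append, List.map_map]
    simp only [List.append_nil, Function.comp_def]
    rw [pv_map_getD_range_take xs j d (by omega), pv_map_getD_range_drop xs j d]
  · have h1 : (List.range xs.length).filter (fun l => !decide (j = l)) = List.range xs.length := by
      apply List.filter_eq_self.mpr
      intro a ha
      simp at ha ⊢
      omega
    rw [h1, pv_map_getD_range]
    rw [List.take_of_length_le (by omega), List.drop_of_length_le (by omega)]
    simp

lemma pv_temp_eq (bp : List (List Int)) (i j k : Nat) :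
    pvA_temp bp i j k
      = if k = i then (bp.getD k []).take j ++ (bp.getD k []).drop (j + 1) else bp.getD k [] := by
  unfold pvA_temp
  rw [pv_foldl_skip]
  by_cases hk : k = i
  · subst hk
    simp only [true_and]
    exact pv_del_idx (bp.getD k []) j 0
  · have : (fun l => !decide (k = i ∧ j = l)) = (fun _ : Nat => true) := by
      funext l; simp [hk]
    rw [if_neg hk, this, List.filter_true, pv_map_getD_range]
    simp

-- the two sub-pattern builders agree
lemma pv_sub_eq (bp : List (List Int)) (i j : Nat) :
    pvA_sub bp i j = pvB_without bp (i : Int) j := by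
  unfold pvA_sub pvB_without
  rw [pv_foldl_app (List.range bp.length) (pvA_temp bp i j) (fun t => 0 < t.length)]
  rw [pv_foldl_app (PySem.List.enumerate bp)
      (fun kr => if kr.1 = (i : Int) then kr.2.take j ++ kr.2.drop (j + 1) else kr.2)
      (fun r => r ≠ [])]
  simp only [List.nil_append]
  have hmap : (List.range bp.length).map (pvA_temp bp i j)
      = (PySem.List.enumerate bp).map
          (fun kr => if kr.1 = (i : Int) then kr.2.take j ++ kr.2.drop (j + 1) else kr.2) := by
    apply List.ext_getElem
    · simp [PySem.List.length_enumerate]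
    · intro n h1 h2
      have hlen : n < bp.length := by simpa using h1
      simp only [List.getElem_map, List.getElem_range, PySem.List.getElem_enumerate]
      rw [pv_temp_eq]
      by_cases hn : n = i
      · subst hn
        simp [List.getD_eq_getElem?_getD, List.getElem?_eq_getElem hlen]
      · have hni : ¬ ((0 : Int) + (n : Int) = (i : Int)) := by
          simp; omega
        simp only [if_neg hn, if_neg hni]
        simp [List.getD_eq_getElem?_getD, List.getElem?_eq_getElem hlen]
  rw [hmap]
  apply List.filter_congr
  intro t _
  cases t <;> simp

-- A's loops as `all`
lemma pv_loopJ_all (bp : List (List Int)) (ht : List (String × Int)) (i : Nat) (js : List Nat) :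
    pvA_loopJ bp ht i js
      = js.all (fun j => ((PySem.Dict.mk ht).get? (pvReprPatt (pvA_sub bp i j))).isSome) := by
  induction js with
  | nil => rfl
  | cons j js ih =>
    unfold pvA_loopJ
    cases h : (PySem.Dict.mk ht).get? (pvReprPatt (pvA_sub bp i j)) <;> simp [h, ih]

lemma pv_loopI_all (bp : List (List Int)) (ht : List (String × Int)) (is : List Nat) :
    pvA_loopI bp ht is
      = is.all (fun i => pvA_loopJ bp ht i (List.range (bp.getD i []).length)) := by
  induction is with
  | nil => rfl
  | cons i is ih =>
    unfold pvA_loopI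
    cases h : pvA_loopJ bp ht i (List.range (bp.getD i []).length) <;>
      simp only [h, List.all_cons, ih] <;> simp

-- `all` over enumerate = `all` over range
lemma pv_all_enumerate {α : Type} (xs : List α) (d : α) (G : Int × α → Bool) : ∀ s : Int,
    (PySem.List.enumerate xs s).all G
      = (List.range xs.length).all (fun m => G ((s + m : Int), xs.getD m d)) := by
  induction xs with
  | nil => intro s; simp [PySem.List.enumerate_nil]
  | cons x xs ih =>
    intro s
    rw [PySem.List.enumerate_cons, List.all_cons, ih (s + 1)]
    rw [show List.range (x :: xs).length = 0 :: (List.range xs.length).map Nat.succ from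
      List.range_succ_eq_map]
    rw [List.all_cons, List.all_map]
    congr 1
    · simp
    · refine List.all_congr rfl fun m => ?_
      simp only [Function.comp_apply, Nat.succ_eq_add_one, List.getD_cons_succ]
      congr 2
      push_cast
      ring

theorem GenerateSubPatternsAndCheck_spec' (bp : List (List Int)) (ht : List (String × Int)) :
    GenerateSubPatternsAndCheck bp ht = GenerateSubPatternsAndCheck_alt bp ht := by
  unfold GenerateSubPatternsAndCheck GenerateSubPatternsAndCheck_alt
  rw [pv_loopI_all, pv_all_enumerate bp [] _ 0]
  refine List.all_congr rfl fun i => ?_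
  rw [pv_loopJ_all]
  refine List.all_congr rfl fun j => ?_
  rw [pv_sub_eq, PySem.Dict.contains_eq_isSome_get?]
  norm_num

-- ===== VERDICT (by name: the statement is the Claim_ definition above) =====
theorem GenerateSubPatternsAndCheck_spec : Claim_equal_GenerateSubPatternsAndCheck := by
  intro bp ht _
  exact GenerateSubPatternsAndCheck_spec' bp ht
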